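-- pv_equiv track=rewrite | github.com/nkbao-dn23/old-memory | 2021/hacktivity/hacktivity-0/shellcoded/solve2.py | genpayload2
-- ===== SOURCE A (Python) =====
-- def encrypt2(c, index):
-- 	if(index & 1 == 1):
-- 		v6 = -1
-- 	else:
-- 		v6 = 1
-- 	mul = v6*index
--
-- 	check = mul+ord(c)
-- 	if(check <= 0 or check > 255):
-- 		return -1
-- 	return chr(check)
--
-- def genpayload2(shellcode):
-- 	output = ""
-- 	for i in range(len(shellcode)):
-- 		tmp = output
-- 		for j in range(0, 256):
-- 			if(j == 255):
-- 				output += "\x00"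
-- 				break
-- 			check = encrypt2(chr(j), i)
-- 			if(check == -1):
-- 				continue
-- 			if(encrypt2(chr(j), i) == shellcode[i]):
-- 				output += chr(j)
-- 				break
--
--
-- 	return output
-- ===== SOURCE B (Python) =====
-- def genpayload2(shellcode):
--     out = []
--     for i, ch in enumerate(shellcode):
--         mul = -i if i % 2 == 1 else i
--         j = ord(ch) - mul
--         out.append(chr(j) if 0 <= j <= 254 else "\x00")
--     return "".join(out)
-- ===== Notes on version B (the rewrite author's own statement) =====
-- stated objective: faster
-- what changed: A brute-force scans all 256 byte values per character (calling encrypt2 twice per candidate) until one encrypts to the target; B computes the unique candidate j = ord(c) - mul directly and range-checks it, emitting \x00 when out of range.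
import Mathlib
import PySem

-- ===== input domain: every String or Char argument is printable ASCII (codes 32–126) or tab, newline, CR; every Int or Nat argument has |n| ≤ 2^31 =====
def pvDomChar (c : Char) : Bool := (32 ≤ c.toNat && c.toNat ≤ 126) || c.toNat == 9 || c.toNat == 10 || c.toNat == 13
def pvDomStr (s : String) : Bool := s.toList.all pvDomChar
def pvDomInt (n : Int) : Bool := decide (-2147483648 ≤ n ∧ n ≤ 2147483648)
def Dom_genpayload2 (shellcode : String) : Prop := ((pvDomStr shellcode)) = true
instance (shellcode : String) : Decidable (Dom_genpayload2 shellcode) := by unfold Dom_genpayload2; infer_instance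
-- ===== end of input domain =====

-- B replaces A's per-index brute-force scan over all 256 byte values by directly
-- computing the unique candidate byte j = ord(c) - mul and range-checking it (objective: faster).

-- ===== PORT A =====
-- Python returns -1 (an int) on the invalid branch and a 1-char string otherwise;
-- ported as Option Char (none = -1): the only use compares the result with a character.
def encrypt2 (c : Char) (index : Int) : Option Char :=
  -- Python 'index & 1 == 1' ported by hand as 'index % 2 == 1' (PySem.Int.mod):
  -- exact here because encrypt2 is only ever called with index ≥ 0 (a range(len) index).
  let v6 : Int := if PySem.Int.mod index 2 == 1 then -1 else 1
  let mul := v6 * index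
  let check := mul + (c.toNat : Int)
  if check ≤ 0 ∨ check > 255 then none else some (Char.ofNat check.toNat)

-- the inner 'for j in range(0, 256)' loop of A, with the early breaks
def gp2Inner (sc : Char) (i : Int) : List Int → List Char → List Char
  | [], output => output
  | j :: rest, output =>
    if j == 255 then output ++ [Char.ofNat 0]
    else
      match encrypt2 (Char.ofNat j.toNat) i with
      | none => gp2Inner sc i rest output          -- check == -1: continue
      | some _ =>
        if encrypt2 (Char.ofNat j.toNat) i == some sc then output ++ [Char.ofNat j.toNat]
        else gp2Inner sc i rest output

def genpayload2 (shellcode : String) : String :=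
  String.ofList ((PySem.List.pyRange 0 (PySem.Str.len shellcode) 1).foldl
    (fun output i =>
      match PySem.List.pyGet? shellcode.toList i with
      | none => output                             -- unreachable: i < len(shellcode)
      | some sc => gp2Inner sc i (PySem.List.pyRange 0 256 1) output)
    [])

-- ===== PORT B =====
def gp2Char (p : Int × Char) : Char :=
  -- Python 'i % 2 == 1' (i is a nonnegative enumerate index)
  let mul : Int := if PySem.Int.mod p.1 2 == 1 then -p.1 else p.1
  let j : Int := (p.2.toNat : Int) - mul
  if 0 ≤ j ∧ j ≤ 254 then Char.ofNat j.toNat else Char.ofNat 0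

def genpayload2_alt (shellcode : String) : String :=
  String.ofList ((PySem.List.enumerate shellcode.toList).map gp2Char)

-- ===== PRECONDITION & SPEC =====
def Spec_genpayload2 (shellcode : String) (out : String) : Prop := out = genpayload2_alt shellcode
instance (shellcode : String) (out : String) : Decidable (Spec_genpayload2 shellcode out) := by unfold Spec_genpayload2; infer_instance

-- ===== CLAIM (what is proved, stated in full; the proofs are below) =====
def Claim_equal_genpayload2 : Prop := ∀ (shellcode : String), Dom_genpayload2 shellcode → Spec_genpayload2 shellcode (genpayload2 shellcode)

-- ===== LEMMAS AND PROOFS =====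

-- the value A's encrypt2 adds at index i
def gp2Mul (i : Int) : Int := (if PySem.Int.mod i 2 == 1 then (-1 : Int) else 1) * i

theorem gp2Mul_eq (i : Int) :
    gp2Mul i = if PySem.Int.mod i 2 == 1 then -i else i := by
  unfold gp2Mul; split_ifs <;> ring

theorem char_ofNat_eq_iff (m : Int) (sc : Char) (h1 : 0 ≤ m) (h2 : m ≤ 255) :
    (Char.ofNat m.toNat = sc) ↔ m = (sc.toNat : Int) := by
  constructor
  · intro h
    have hv : (m.toNat).isValidChar := by
      left; omega
    have := congrArg Char.toNat h
    rw [Char.toNat_ofNat, if_pos hv] at this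
    omega
  · intro h
    have : m.toNat = sc.toNat := by omega
    rw [this, Char.ofNat_toNat]

theorem gp2Inner_cons (sc : Char) (i j : Int) (rest : List Int) (output : List Char) :
    gp2Inner sc i (j :: rest) output =
      (if j == 255 then output ++ [Char.ofNat 0]
       else match encrypt2 (Char.ofNat j.toNat) i with
         | none => gp2Inner sc i rest output
         | some _ =>
           if encrypt2 (Char.ofNat j.toNat) i == some sc then output ++ [Char.ofNat j.toNat]
           else gp2Inner sc i rest output) := rfl

theorem inner_spec (sc : Char) (i : Int)
    (hs1 : 1 ≤ (sc.toNat : Int)) (hs2 : (sc.toNat : Int) ≤ 255) :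
    ∀ (n : Nat) (a : Int), 0 ≤ a → a ≤ 255 → (256 - a).toNat = n →
    ∀ output : List Char,
    gp2Inner sc i (PySem.List.pyRange a 256 1) output =
      output ++ [if 0 ≤ a ∧ a ≤ (sc.toNat : Int) - gp2Mul i ∧ (sc.toNat : Int) - gp2Mul i ≤ 254
                 then Char.ofNat ((sc.toNat : Int) - gp2Mul i).toNat else Char.ofNat 0] := by
  intro n
  induction n with
  | zero => intro a h0 h1 hn; omega
  | succ n ih =>
    intro a h0 h1 hn output
    rw [PySem.List.pyRange_one_cons (by omega : a < 256), gp2Inner_cons]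
    by_cases h255 : a = 255
    · subst h255
      rw [if_pos (by decide)]
      have hnc : ¬ (0 ≤ (255:Int) ∧ (255:Int) ≤ (sc.toNat : Int) - gp2Mul i ∧ (sc.toNat : Int) - gp2Mul i ≤ 254) := by omega
      rw [if_neg hnc]
    · have hj : ((Char.ofNat a.toNat).toNat : Int) = a := by
        have hv : (a.toNat).isValidChar := by left; omega
        rw [Char.toNat_ofNat, if_pos hv]; omega
      have hrec : ∀ out, gp2Inner sc i (PySem.List.pyRange (a+1) 256 1) out =
          out ++ [if 0 ≤ a + 1 ∧ a + 1 ≤ (sc.toNat : Int) - gp2Mul i ∧ (sc.toNat : Int) - gp2Mul i ≤ 254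
                  then Char.ofNat ((sc.toNat : Int) - gp2Mul i).toNat else Char.ofNat 0] := by
        intro out; exact ih (a+1) (by omega) (by omega) (by omega) out
      have henc : encrypt2 (Char.ofNat a.toNat) i =
          if gp2Mul i + a ≤ 0 ∨ gp2Mul i + a > 255 then none
          else some (Char.ofNat (gp2Mul i + a).toNat) := by
        unfold encrypt2 gp2Mul
        rw [hj]
      rw [if_neg (by simpa using h255), henc]
      by_cases hval : gp2Mul i + a ≤ 0 ∨ gp2Mul i + a > 255
      · rw [if_pos hval]
        show gp2Inner sc i (PySem.List.pyRange (a+1) 256 1) output = _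
        rw [hrec output]
        congr 2
        have hne : a ≠ (sc.toNat : Int) - gp2Mul i := by omega
        by_cases hc : a + 1 ≤ (sc.toNat : Int) - gp2Mul i ∧ (sc.toNat : Int) - gp2Mul i ≤ 254
        · rw [if_pos (by omega), if_pos (by omega)]
        · rw [if_neg (by omega), if_neg (by omega)]
      · rw [if_neg hval]
        show (if some (Char.ofNat (gp2Mul i + a).toNat) == some sc
              then output ++ [Char.ofNat a.toNat]
              else gp2Inner sc i (PySem.List.pyRange (a+1) 256 1) output) = _
        by_cases heq : gp2Mul i + a = (sc.toNat : Int)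
        · rw [if_pos (by
            simp only [beq_iff_eq, Option.some.injEq]
            exact (char_ofNat_eq_iff _ _ (by omega) (by omega)).mpr heq)]
          have ha : a = (sc.toNat : Int) - gp2Mul i := by omega
          rw [if_pos (by omega), ← ha]
        · rw [if_neg (by
            simp only [beq_iff_eq, Option.some.injEq]
            exact fun h => heq ((char_ofNat_eq_iff _ _ (by omega) (by omega)).mp h))]
          rw [hrec output]
          congr 2
          have hne : a ≠ (sc.toNat : Int) - gp2Mul i := by omega
          by_cases hc : a + 1 ≤ (sc.toNat : Int) - gp2Mul i ∧ (sc.toNat : Int) - gp2Mul i ≤ 254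
          · rw [if_pos (by omega), if_pos (by omega)]
          · rw [if_neg (by omega), if_neg (by omega)]

theorem gp2Char_eq_inner_val (k : Nat) (c : Char) :    
    (if 0 ≤ (0:Int) ∧ (0:Int) ≤ (c.toNat : Int) - gp2Mul k ∧ (c.toNat : Int) - gp2Mul k ≤ 254
     then Char.ofNat ((c.toNat : Int) - gp2Mul k).toNat else Char.ofNat 0) = gp2Char ((k : Int), c) := by
  unfold gp2Char
  rw [gp2Mul_eq]
  simp only
  split_ifs <;> first | rfl | omega

theorem outer_spec (cs : List Char) (hdom : ∀ c ∈ cs, pvDomChar c = true) :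
    ∀ (n k : Nat), k ≤ cs.length → cs.length - k = n →
    ∀ acc : List Char,
    (PySem.List.pyRange (k : Int) (cs.length : Int) 1).foldl
      (fun output i =>
        match PySem.List.pyGet? cs i with
        | none => output
        | some sc => gp2Inner sc i (PySem.List.pyRange 0 256 1) output) acc =
    acc ++ (PySem.List.enumerate (cs.drop k) (k : Int)).map gp2Char := by
  intro n
  induction n with
  | zero =>
    intro k hk hn acc
    have hk' : k = cs.length := by omega
    rw [PySem.List.pyRange_one_eq_nil (a := (k : Int)) (b := (cs.length : Int)) (by omega), hk', List.drop_length]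
    simp [PySem.List.enumerate]
  | succ n ih =>
    intro k hk hn acc
    have hklt : k < cs.length := by omega
    rw [PySem.List.pyRange_one_cons (a := (k : Int)) (b := (cs.length : Int)) (by exact_mod_cast hklt)]
    have hdrop : cs.drop k = cs[k] :: cs.drop (k+1) := List.drop_eq_getElem_cons hklt
    have hget : PySem.List.pyGet? cs (k : Int) = some cs[k] := by
      rw [PySem.List.pyGet?_natCast, List.getElem?_eq_getElem hklt]
    have hc := hdom cs[k] (List.getElem_mem hklt)
    have hc1 : 1 ≤ ((cs[k]).toNat : Int) := by
      unfold pvDomChar at hc; simp at hc; omega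
    have hc2 : ((cs[k]).toNat : Int) ≤ 255 := by
      unfold pvDomChar at hc; simp at hc; omega
    simp only [List.foldl_cons, hget]
    rw [inner_spec cs[k] (k : Int) hc1 hc2 256 0 (by omega) (by omega) (by decide) acc]
    rw [gp2Char_eq_inner_val k cs[k]]
    have hcast : ((k : Int) + 1) = ((k + 1 : Nat) : Int) := by push_cast; ring
    rw [hcast, ih (k+1) (by omega) (by omega) (acc ++ [gp2Char ((k : Int), cs[k])])]
    rw [hdrop, PySem.List.enumerate_cons, ← hcast]
    simp [List.append_assoc]

-- ===== VERDICT (by name: the statement is the Claim_ definition above) =====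
theorem genpayload2_spec : Claim_equal_genpayload2 := by
  intro s hdom
  unfold Spec_genpayload2 genpayload2 genpayload2_alt
  have hdom' : ∀ c ∈ s.toList, pvDomChar c = true := by
    intro c hc
    exact List.all_eq_true.mp hdom c hc
  rw [PySem.Str.len_eq]
  have := outer_spec s.toList hdom' s.toList.length 0 (by omega) (by omega) []
  simp only [Nat.cast_zero] at this
  rw [this]
  simp
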